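-- pv_equiv track=rewrite | github.com/siorkis/CS-SEM5- | lab5/extensions/caesar.py | cyclic_key
-- ===== SOURCE A (Python) =====
-- def cyclic_key(string, key):
--     key = list(key)
--     if len(string) == len(key):
--         return key
--     else:
--         for i in range(len(string) - len(key)):
--             key.append(key[i % len(key)])
--     return "".join(key)
-- ===== SOURCE B (Python) =====
-- def cyclic_key(string, key):
--     if len(string) <= len(key):
--         return key
--     reps = (len(string) + len(key) - 1) // len(key)
--     return (key * reps)[:len(string)]
-- ===== Notes on version B (the rewrite author's own statement) =====
-- stated objective: idiomatic
-- what changed: Replaces the incremental append loop with modular self-indexing by a repeat-count computation and a single repeat-and-slice (key * ceil(n/k))[:n].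
-- outside the precondition, e.g. on cyclic_key('ab', 'cd'): A returns ['c', 'd'], B returns 'cd'; on cyclic_key('abc', ''): A raises ZeroDivisionError, B raises ZeroDivisionError
import Mathlib
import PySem

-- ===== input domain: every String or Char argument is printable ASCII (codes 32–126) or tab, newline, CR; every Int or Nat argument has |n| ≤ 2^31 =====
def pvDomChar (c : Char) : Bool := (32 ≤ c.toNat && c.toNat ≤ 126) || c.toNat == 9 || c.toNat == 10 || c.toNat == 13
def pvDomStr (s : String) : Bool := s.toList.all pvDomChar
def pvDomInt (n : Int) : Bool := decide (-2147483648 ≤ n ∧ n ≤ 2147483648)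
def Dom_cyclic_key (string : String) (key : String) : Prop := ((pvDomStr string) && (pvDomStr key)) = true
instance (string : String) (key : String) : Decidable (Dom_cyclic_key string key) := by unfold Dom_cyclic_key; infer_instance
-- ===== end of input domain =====

-- B replaces A's incremental modular-index append loop by a repeat-and-slice computation (same cost, more idiomatic).
-- Equivalence is about the RETURN value; on equal lengths Python A returns a LIST (outside Pre_).

-- ===== PORT A =====
def cyclic_key (string : String) (key : String) : String :=
  let keyL := key.toList
  if string.toList.length = keyL.length then
    String.ofList keyL  -- Python returns the LIST here (not a str); excluded by Pre_
  else
    String.ofList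
      ((PySem.List.pyRange 0 ((string.toList.length : Int) - (keyL.length : Int)) 1).foldl
        (fun acc i =>
          acc ++ [(PySem.List.pyGet? acc (PySem.Int.mod i (acc.length : Int))).getD ' '])  -- key[i % len(key)]; default unreachable inside Pre_
        keyL)

-- ===== PORT B =====
def cyclic_key_alt (string : String) (key : String) : String :=
  if string.toList.length ≤ key.toList.length then key
  else
    let n := string.toList.length
    let k := key.toList.length
    let reps := PySem.Int.floordiv ((n : Int) + (k : Int) - 1) (k : Int)
    String.ofList (PySem.List.slice ((List.replicate reps.toNat key.toList).flatten) none (some (n : Int)))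

-- ===== PRECONDITION & SPEC =====
-- Pre_ excludes (i) equal lengths, where A returns a LIST of chars instead of a str, and
-- (ii) empty key with a longer string, where both A and B raise ZeroDivisionError.
def Pre_cyclic_key (string : String) (key : String) : Prop :=
  string.toList.length ≠ key.toList.length ∧ key ≠ ""
instance (string : String) (key : String) : Decidable (Pre_cyclic_key string key) := by
  unfold Pre_cyclic_key; infer_instance
def pvWitness_cyclic_key : String × String := ("abcdef", "ab")

def Spec_cyclic_key (string : String) (key : String) (out : String) : Prop := out = cyclic_key_alt string key
instance (string : String) (key : String) (out : String) : Decidable (Spec_cyclic_key string key out) := by unfold Spec_cyclic_key; infer_instance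

-- ===== CLAIM (what is proved, stated in full; the proofs are below) =====
def Claim_equal_cyclic_key : Prop := ∀ (string : String) (key : String), Dom_cyclic_key string key → Pre_cyclic_key string key → Spec_cyclic_key string key (cyclic_key string key)

-- ===== LEMMAS AND PROOFS =====

-- the cyclic extension, pointwise
def pvCyc (keyL : List Char) (j : Nat) : Char := keyL.getD (j % keyL.length) ' '

theorem pvCyc_add_len (keyL : List Char) (j : Nat) : pvCyc keyL (keyL.length + j) = pvCyc keyL j := by
  simp [pvCyc, Nat.add_mod_left]

theorem pvCyc_self (keyL : List Char) : (List.range keyL.length).map (pvCyc keyL) = keyL := by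
  apply List.ext_getElem (by simp)
  intro i h1 h2
  simp [pvCyc, Nat.mod_eq_of_lt h2, List.getElem?_eq_getElem h2]

-- A's loop computes the pointwise cyclic extension
theorem pvLoopA (keyL : List Char) (hk : 0 < keyL.length) (t : Nat) :
    (PySem.List.pyRange 0 (t : Int) 1).foldl
        (fun acc i =>
          acc ++ [(PySem.List.pyGet? acc (PySem.Int.mod i (acc.length : Int))).getD ' '])
        keyL
      = (List.range (keyL.length + t)).map (pvCyc keyL) := by
  induction t with
  | zero => simp [PySem.List.pyRange_one_eq_nil, pvCyc_self]
  | succ t ih =>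
    have h1 : ((t : Int) + 1) = ((t + 1 : Nat) : Int) := by push_cast; ring
    rw [← h1, PySem.List.pyRange_one_succ_right (by positivity), List.foldl_append, ih]
    have hlen : ((List.range (keyL.length + t)).map (pvCyc keyL)).length = keyL.length + t := by simp
    have hmod : PySem.Int.mod (t : Int) ((keyL.length + t : Nat) : Int) = (t : Int) := by
      rw [PySem.Int.mod_eq_emod_of_pos (by exact_mod_cast Nat.lt_of_lt_of_le hk (by omega))]
      exact Int.emod_eq_of_lt (by positivity) (by exact_mod_cast by omega)
    have hget : PySem.List.pyGet? ((List.range (keyL.length + t)).map (pvCyc keyL)) (t : Int)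
        = some (pvCyc keyL t) := by
      rw [PySem.List.pyGet?_natCast]
      simp [List.getElem?_map, List.getElem?_range (by omega : t < keyL.length + t)]
    simp only [List.foldl_cons, List.foldl_nil, hlen, hmod, hget, Option.getD_some]
    have hsucc : keyL.length + (t + 1) = (keyL.length + t) + 1 := rfl
    rw [hsucc, List.range_succ, List.map_append]
    simp [pvCyc_add_len]

-- B's repetition is the pointwise cyclic extension
theorem pvFlattenRep (keyL : List Char) (m : Nat) :
    (List.replicate m keyL).flatten = (List.range (m * keyL.length)).map (pvCyc keyL) := by
  induction m with
  | zero => simp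
  | succ m ih =>
    rw [List.replicate_succ, List.flatten_cons, ih]
    have : (m + 1) * keyL.length = keyL.length + m * keyL.length := by ring
    rw [this, List.range_add, List.map_append, pvCyc_self, List.map_map]
    congr 1
    exact List.map_congr_left (fun j _ => (pvCyc_add_len keyL j).symm)

theorem cyclic_key_spec : Claim_equal_cyclic_key := by
  intro string key _ hpre
  obtain ⟨hne, hkey⟩ := hpre
  unfold Spec_cyclic_key cyclic_key cyclic_key_alt
  have hk : 0 < key.toList.length := by
    rcases Nat.eq_zero_or_pos key.toList.length with h | h
    · exact absurd (by simpa using congrArg String.ofList (List.length_eq_zero_iff.mp h)) (by simpa using hkey)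
    · exact h
  by_cases hle : string.toList.length ≤ key.toList.length
  · -- string shorter: loop range is empty, A returns the joined key; B returns key
    have hlt : string.toList.length < key.toList.length := lt_of_le_of_ne hle hne
    simp only [if_neg hne, if_pos hle]
    rw [PySem.List.pyRange_one_eq_nil (by omega)]
    simp
  · -- string longer: both are the cyclic extension of length n
    simp only [if_neg hne, if_neg hle]
    set n := string.toList.length with hn
    set k := key.toList.length with hkdef
    have hnk : k < n := by omega
    have hcast : (n : Int) - (k : Int) = ((n - k : Nat) : Int) := by omega
    rw [hcast, pvLoopA key.toList hk (n - k)]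
    have hstep : k + (n - k) = n := by omega
    rw [hstep]
    -- B side
    have hcast2 : (n : Int) + (k : Int) - 1 = ((n + k - 1 : Nat) : Int) := by omega
    rw [hcast2, PySem.Int.floordiv_natCast]
    set m := (n + k - 1) / k with hm
    have hdm : k * m + (n + k - 1) % k = n + k - 1 := by rw [hm]; exact Nat.div_add_mod _ _
    have hmodlt : (n + k - 1) % k < k := Nat.mod_lt _ hk
    have hnm : n ≤ m * k := by rw [Nat.mul_comm]; omega
    rw [Int.toNat_natCast, pvFlattenRep key.toList m,
      PySem.List.slice_to_natCast, ← List.map_take, List.take_range, Nat.min_eq_left hnm]
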